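-- pv_equiv track=rewrite | github.com/belokopytova/test-shop | task1.py | first_elements
-- ===== SOURCE A (Python) =====
-- def first_elements(n: int) -> list:
--
--     result = []
--     num = 1
--     count = 0
--
--     while count < n:
--         for _ in range(num):
--             if count >= n:
--                 break
--             result.append(num)
--             count += 1
--         num += 1
--
--     return result
-- ===== SOURCE B (Python) =====
-- def _isqrt(x):
--     # integer square root for x >= 1: Newton's method from above
--     r = x
--     while r * r > x:
--         r = (r + x // r) // 2
--     return r
--
--
-- def _pos_value(p):
--     # smallest k with k*(k+1)/2 >= p, i.e. the value at 1-indexed position p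
--     t = _isqrt(8 * p - 7)
--     k = (t + 1) // 2
--     if k * (k + 1) // 2 < p:
--         k += 1
--     return k
--
--
-- def first_elements(n: int) -> list:
--     return [_pos_value(p) for p in range(1, n + 1)]
-- ===== Notes on version B (the rewrite author's own statement) =====
-- stated objective: alternative
-- what changed: Replaced the counter-driven nested while/for block-appending loop by a per-position closed form: each position p maps directly to the smallest k whose triangular number reaches p, computed with a hand-written integer Newton square root, in a single list comprehension with no mutable counters.
import Mathlib
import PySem

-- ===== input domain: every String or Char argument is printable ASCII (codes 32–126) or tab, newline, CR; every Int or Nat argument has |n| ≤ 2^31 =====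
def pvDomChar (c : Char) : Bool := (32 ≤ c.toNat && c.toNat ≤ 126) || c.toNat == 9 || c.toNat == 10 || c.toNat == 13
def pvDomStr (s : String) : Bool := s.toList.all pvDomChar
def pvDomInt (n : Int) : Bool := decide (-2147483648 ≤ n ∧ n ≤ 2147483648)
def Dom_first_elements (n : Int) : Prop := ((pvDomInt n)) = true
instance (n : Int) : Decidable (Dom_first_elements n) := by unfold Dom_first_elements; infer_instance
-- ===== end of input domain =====

-- B replaces A's counter-driven nested append loop by a per-position closed form
-- (smallest k with k(k+1)/2 ≥ p via an integer Newton isqrt); alternative decomposition, not faster.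


-- ===== PORT A =====
-- inner 'for _ in range(num)' loop: iters = remaining iterations; break modelled by returning
def innerA (iters : Nat) (n num count : Int) (result : List Int) : List Int × Int :=
  match iters with
  | 0 => (result, count)
  | f + 1 =>
    if count ≥ n then (result, count)
    else innerA f n num (count + 1) (result ++ [num])

-- outer 'while count < n'; fuel is a totality guard only (n.toNat+1 outer iterations always suffice)
def outerA (fuel : Nat) (n num count : Int) (result : List Int) : List Int :=
  match fuel with
  | 0 => result
  | f + 1 =>
    if count < n then
      let rc := innerA num.toNat n num count result
      outerA f n (num + 1) rc.2 rc.1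
    else result

def first_elements (n : Int) : List Int := outerA (n.toNat + 1) n 1 0 []

-- ===== PORT B =====
-- Newton's method 'while r*r > x'; fuel is a totality guard only (r decreases each step)
def isqrtGo (fuel : Nat) (x r : Int) : Int :=
  match fuel with
  | 0 => r
  | f + 1 =>
    if r * r > x then isqrtGo f x (PySem.Int.floordiv (r + PySem.Int.floordiv x r) 2)
    else r

def pyIsqrt (x : Int) : Int := isqrtGo (x.toNat + 1) x x

def posValue (p : Int) : Int :=
  let t := pyIsqrt (8 * p - 7)
  let k := PySem.Int.floordiv (t + 1) 2
  if PySem.Int.floordiv (k * (k + 1)) 2 < p then k + 1 else k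

def first_elements_alt (n : Int) : List Int :=
  (PySem.List.pyRange 1 (n + 1) 1).map posValue

-- ===== PRECONDITION & SPEC =====
def Spec_first_elements (n : Int) (out : List Int) : Prop := out = first_elements_alt n
instance (n : Int) (out : List Int) : Decidable (Spec_first_elements n out) := by unfold Spec_first_elements; infer_instance

-- ===== CLAIM (what is proved, stated in full; the proofs are below) =====
def Claim_equal_first_elements : Prop := ∀ (n : Int), Dom_first_elements n → Spec_first_elements n (first_elements n)

-- ===== LEMMAS AND PROOFS =====

theorem isqrtGo_eq (x s : Int) (hs1 : 1 ≤ s) (hsx : s * s ≤ x) (hxs : x < (s + 1) * (s + 1)) :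
    ∀ (fuel : Nat) (r : Int), s ≤ r → r - s < (fuel : Int) → isqrtGo fuel x r = s := by
  intro fuel
  induction fuel with
  | zero => intro r h1 h2; omega
  | succ f ih =>
    intro r hsr hf
    rw [isqrtGo]
    by_cases h : r * r > x
    · simp only [h, if_true]
      have hr0 : 0 < r := by omega
      have hq1 : 2 * s - r ≤ PySem.Int.floordiv x r := by
        rw [PySem.Int.le_floordiv_iff_mul_le hr0]
        nlinarith [sq_nonneg (r - s), hsx]
      have hq2 : PySem.Int.floordiv x r < r := by
        rw [PySem.Int.floordiv_lt_iff_lt_mul hr0]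
        exact h
      have hr'1 : s ≤ PySem.Int.floordiv (r + PySem.Int.floordiv x r) 2 := by
        rw [PySem.Int.le_floordiv_iff_mul_le (by norm_num : (0:Int) < 2)]
        omega
      have hr'2 : PySem.Int.floordiv (r + PySem.Int.floordiv x r) 2 < r := by
        rw [PySem.Int.floordiv_lt_iff_lt_mul (by norm_num : (0:Int) < 2)]
        omega
      exact ih _ hr'1 (by omega)
    · simp only [h, if_false]
      rw [not_lt] at h
      by_cases hrs : r = s
      · exact hrs
      · exfalso
        have hs2 : s + 1 ≤ r := by omega
        nlinarith

theorem pyIsqrt_eq (x s : Int) (hs1 : 1 ≤ s) (hsx : s * s ≤ x) (hxs : x < (s + 1) * (s + 1)) :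
    pyIsqrt x = s := by
  have hx1 : 1 ≤ x := by nlinarith
  exact isqrtGo_eq x s hs1 hsx hxs _ x (by nlinarith) (by omega)

-- exact halving of an even integer
theorem floordiv_two_even (m : Int) : PySem.Int.floordiv (m + m) 2 = m := by
  rw [PySem.Int.floordiv_eq_iff_of_pos (by norm_num : (0:Int) < 2)]
  omega

theorem posValue_spec (p : Int) (hp : 1 ≤ p) :
    1 ≤ posValue p ∧ (posValue p - 1) * posValue p < 2 * p ∧ 2 * p ≤ posValue p * (posValue p + 1) := by
  have hx1 : (1 : Int) ≤ 8 * p - 7 := by omega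
  set x : Int := 8 * p - 7 with hxdef
  have hs1 : (1 : Int) ≤ (Nat.sqrt x.toNat : Int) := by
    have : 0 < Nat.sqrt x.toNat := Nat.sqrt_pos.mpr (by omega)
    omega
  have hsx : (Nat.sqrt x.toNat : Int) * (Nat.sqrt x.toNat : Int) ≤ x := by
    have h := Nat.sqrt_le' x.toNat
    rw [pow_two] at h
    have h2 : ((Nat.sqrt x.toNat : Nat) : Int) * ((Nat.sqrt x.toNat : Nat) : Int) ≤ (x.toNat : Int) := by
      exact_mod_cast h
    omega
  have hxs : x < ((Nat.sqrt x.toNat : Int) + 1) * ((Nat.sqrt x.toNat : Int) + 1) := by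
    have h := Nat.lt_succ_sqrt' x.toNat
    rw [Nat.succ_eq_add_one, pow_two] at h
    have h2 : (x.toNat : Int) < ((Nat.sqrt x.toNat + 1 : Nat) : Int) * ((Nat.sqrt x.toNat + 1 : Nat) : Int) := by
      exact_mod_cast h
    push_cast at h2
    omega
  set s : Int := (Nat.sqrt x.toNat : Int) with hsdef
  have ht : pyIsqrt x = s := pyIsqrt_eq x s hs1 hsx hxs
  have hk : 2 * PySem.Int.floordiv (s + 1) 2 ≤ s + 1 ∧ s + 1 < 2 * PySem.Int.floordiv (s + 1) 2 + 2 := by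
    constructor
    · have h1 := (PySem.Int.le_floordiv_iff_mul_le (a := s + 1) (b := 2)
        (q := PySem.Int.floordiv (s + 1) 2) (by norm_num)).mp le_rfl
      omega
    · have h1 := (PySem.Int.floordiv_lt_iff_lt_mul (a := s + 1) (b := 2)
        (q := PySem.Int.floordiv (s + 1) 2 + 1) (by norm_num)).mp (by omega)
      omega
  set k : Int := PySem.Int.floordiv (s + 1) 2 with hkdef
  have hk1 : 1 ≤ k := by omega
  have hslo : 2 * k - 1 ≤ s := by omega
  have hshi : s ≤ 2 * k := by omega
  have htri : 2 * PySem.Int.floordiv (k * (k + 1)) 2 = k * (k + 1) := by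
    obtain ⟨m, hm⟩ := Int.even_mul_succ_self k
    rw [hm, floordiv_two_even]; omega
  -- lower bound: 8p - 7 ≥ s² ≥ (2k-1)² ⟹ 2p ≥ k² - k + 2
  have hlow : k * k - k + 2 ≤ 2 * p := by nlinarith
  -- upper bound: 8p - 7 ≤ (s+1)² - 1 ≤ (2k+1)² - 1 ⟹ 2p ≤ k² + k + 1
  have hhigh : 2 * p ≤ k * k + k + 1 := by nlinarith
  show 1 ≤ posValue p ∧ _
  rw [posValue]
  simp only [← hxdef, ht, ← hkdef]
  by_cases hbr : PySem.Int.floordiv (k * (k + 1)) 2 < p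
  · simp only [hbr, if_true]
    refine ⟨by omega, by nlinarith, by nlinarith⟩
  · simp only [hbr, if_false]
    rw [not_lt] at hbr
    refine ⟨by omega, by nlinarith, by nlinarith⟩

theorem posValue_unique (p k : Int) (hk : 1 ≤ k) (h1 : (k - 1) * k < 2 * p) (h2 : 2 * p ≤ k * (k + 1)) :
    posValue p = k := by
  have hp : 1 ≤ p := by nlinarith
  obtain ⟨hj1, hj2, hj3⟩ := posValue_spec p hp
  set j := posValue p with hj
  by_contra hne
  rcases lt_or_gt_of_ne hne with hlt | hgt
  · nlinarith
  · nlinarith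

theorem innerA_eq (n num : Int) :
    ∀ (iters : Nat) (count : Int) (acc : List Int), count ≤ n →
      innerA iters n num count acc =
        (acc ++ List.replicate (min iters (n - count).toNat) num,
         count + (min iters (n - count).toNat : Nat)) := by
  intro iters
  induction iters with
  | zero => intro count acc _; simp [innerA]
  | succ f ih =>
    intro count acc hcn
    rw [innerA]
    by_cases h : count ≥ n
    · have h0 : (n - count).toNat = 0 := by omega
      simp [h, h0]
    · simp only [h, if_false]
      rw [not_le] at h
      rw [ih (count + 1) (acc ++ [num]) (by omega)]
      have hm : min (f + 1) (n - count).toNat = min f (n - (count + 1)).toNat + 1 := by omega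
      rw [hm]
      simp only [Prod.mk.injEq]
      refine ⟨?_, by push_cast; omega⟩
      rw [List.append_assoc, List.replicate_succ]
      rfl

theorem map_const_on_range :
    ∀ (m : Nat) (a : Int) (f : Int → Int) (c : Int),
      (∀ p : Int, a ≤ p → p < a + m → f p = c) →
      (PySem.List.pyRange a (a + m) 1).map f = List.replicate m c := by
  intro m
  induction m with
  | zero => intro a f c _; simp [PySem.List.pyRange_one_eq_nil]
  | succ m ih =>
    intro a f c hf
    rw [PySem.List.pyRange_one_cons (by push_cast; omega)]
    rw [List.map_cons, hf a le_rfl (by push_cast; omega), List.replicate_succ]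
    congr 1
    have : a + (m + 1 : Nat) = (a + 1) + (m : Nat) := by push_cast; omega
    rw [this]
    exact ih (a + 1) f c (fun p h1 h2 => hf p (by omega) (by push_cast at h2 ⊢; omega))

theorem outerA_eq :
    ∀ (fuel : Nat) (n num count : Int) (acc : List Int),
      1 ≤ num → (count < n → 2 * count = (num - 1) * num) → n - count < (fuel : Int) →
      outerA fuel n num count acc = acc ++ (PySem.List.pyRange (count + 1) (n + 1) 1).map posValue := by
  intro fuel
  induction fuel with
  | zero =>
    intro n num count acc _ _ hf
    rw [outerA, PySem.List.pyRange_one_eq_nil (by push_cast at hf; omega)]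
    simp
  | succ f ih =>
    intro n num count acc hnum hinv hf
    rw [outerA]
    by_cases h : count < n
    · simp only [h, if_true]
      rw [innerA_eq n num num.toNat count acc (by omega)]
      set m : Nat := min num.toNat (n - count).toNat with hmdef
      have hm1 : 1 ≤ m := by omega
      have hmle : (m : Int) ≤ n - count := by omega
      have hmnum : (m : Int) ≤ num := by omega
      have hinv' : count + m < n → 2 * (count + m) = num * (num + 1) := by
        intro hlt
        have hmn : (m : Int) = num := by omega
        have hc := hinv h
        rw [hmn]
        linear_combination hc
      rw [ih n (num + 1) (count + m) (acc ++ List.replicate m num) (by omega)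
          (by intro hlt; have h2 := hinv' hlt; linear_combination h2) (by omega)]
      rw [List.append_assoc]
      congr 1
      rw [PySem.List.pyRange_one_append (count + 1) (count + m + 1) (n + 1) (by omega) (by omega)]
      rw [List.map_append]
      congr 1
      have hsplit : count + 1 + (m : Int) = count + m + 1 := by omega
      rw [← hsplit]
      refine (map_const_on_range m (count + 1) posValue num ?_).symm
      intro p hp1 hp2
      have hc := hinv h
      apply posValue_unique p num hnum
      · nlinarith [hc, hp1]
      · nlinarith [hc, hp2, hmnum]
    · simp only [h, if_false]
      rw [PySem.List.pyRange_one_eq_nil (by omega)]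
      simp

-- ===== VERDICT (by name: the statement is the Claim_ definition above) =====
theorem first_elements_spec : Claim_equal_first_elements := by
  intro n _
  show first_elements n = first_elements_alt n
  rw [first_elements, first_elements_alt]
  rw [outerA_eq (n.toNat + 1) n 1 0 [] (by omega) (by intro _; ring) (by push_cast; omega)]
  simp
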